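-- pv_equiv track=rewrite | github.com/EgorCry/Deep_Learning_Playground | Решение задач с собеседований/HyperCheckers.py | hyper_checkers
-- ===== SOURCE A (Python) =====
-- def hyper_checkers(n, k, x):
--     n = n
--     k = k
--     x = x
--     cnt_nums = {}
--     for i in x:
--         if i not in cnt_nums:
--             cnt_nums[i] = 0
--         cnt_nums[i] += 1
--     uniq_nums = list(cnt_nums.keys())
--     uniq_nums.sort()
--     r = 0
--     nswr = 0
--     duplicates = 0
--     for l in range(len(uniq_nums)):
--         while r < len(uniq_nums) and uniq_nums[l] * k >= uniq_nums[r]: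
--             if cnt_nums[uniq_nums[r]] >= 2:
--                 duplicates += 1
--             r += 1
--         range_len = r - l
--         if cnt_nums[uniq_nums[l]] >= 2:
--             nswr += (range_len - 1) * 3
--         if cnt_nums[uniq_nums[l]] >= 3:
--             nswr += 1
--         nswr += (range_len - 1) * (range_len - 2) * 3
--         if cnt_nums[uniq_nums[l]] >= 2:
--             duplicates -= 1
--         nswr += duplicates * 3
--     return nswr
-- ===== SOURCE B (Python) =====
-- def hyper_checkers(n, k, x):
--     cnt = {}
--     for v in x:
--         cnt[v] = cnt.get(v, 0) + 1
--     uniq = sorted(cnt.keys())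
--     # dpre[i] = how many of the first i unique values occur at least twice
--     dpre = [0]
--     for v in uniq:
--         dpre.append(dpre[-1] + (1 if cnt[v] >= 2 else 0))
--     total = 0
--     for l, v in enumerate(uniq):
--         r = _bisect_right(uniq, v * k)
--         m = r - l
--         total += (((m - 1) * 3 if cnt[v] >= 2 else 0)
--                   + (1 if cnt[v] >= 3 else 0)
--                   + (m - 1) * (m - 2) * 3
--                   + (dpre[r] - dpre[l + 1]) * 3)
--     return total
--
--
-- def _bisect_right(a, t):
--     lo, hi = 0, len(a)
--     while lo < hi:
--         mid = (lo + hi) // 2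
--         if a[mid] <= t:
--             lo = mid + 1
--         else:
--             hi = mid
--     return lo
-- ===== Notes on version B (the rewrite author's own statement) =====
-- stated objective: alternative
-- what changed: Replaces A's shared never-reset pointer and incrementally maintained duplicate counter by a per-index binary search over the sorted unique values plus a precomputed prefix-sum table of duplicate-valued entries.
-- outside the precondition, e.g. on hyper_checkers(0, -1, [-2, 1]): A returns 0, B returns 6
import Mathlib
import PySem

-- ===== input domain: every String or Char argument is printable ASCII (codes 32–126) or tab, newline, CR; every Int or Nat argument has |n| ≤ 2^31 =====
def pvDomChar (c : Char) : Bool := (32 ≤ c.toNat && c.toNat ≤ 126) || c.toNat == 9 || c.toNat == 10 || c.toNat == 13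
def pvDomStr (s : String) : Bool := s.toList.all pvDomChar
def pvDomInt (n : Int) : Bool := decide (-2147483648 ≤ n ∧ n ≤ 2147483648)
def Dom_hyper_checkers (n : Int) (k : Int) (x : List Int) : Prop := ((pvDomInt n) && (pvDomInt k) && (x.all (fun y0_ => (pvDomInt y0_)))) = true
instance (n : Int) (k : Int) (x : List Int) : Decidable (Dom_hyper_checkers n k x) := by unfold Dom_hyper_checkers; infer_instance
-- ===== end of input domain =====

-- B replaces A's shared never-reset pointer and incremental duplicate counter by a per-index
-- binary search over the sorted unique values plus a prefix-sum table (alternative decomposition).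

-- ===== PORT A =====
-- counting dict: `if i not in cnt: cnt[i] = 0; cnt[i] += 1`
def aCount (x : List Int) : PySem.Dict Int Int :=
  x.foldl (fun d i =>
    let d' := if d.contains i = false then d.insert i 0 else d
    d'.insert i (d'.getD i 0 + 1)) PySem.Dict.empty

-- the inner `while r < len(uniq) and uniq[l]*k >= uniq[r]` loop (t = uniq[l]*k)
def aAdv (uniq : List Int) (cnt : PySem.Dict Int Int) (t : Int) (r : Nat) (dup : Int) : Nat × Int :=
  if h : r < uniq.length ∧ uniq.getD r 0 ≤ t then
    aAdv uniq cnt t (r + 1)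
      (if 2 ≤ cnt.getD (uniq.getD r 0) 0 then dup + 1 else dup)
  else (r, dup)
termination_by uniq.length - r
decreasing_by omega

-- the outer `for l in range(len(uniq))` loop with state (r, duplicates, nswr)
def aLoop (uniq : List Int) (cnt : PySem.Dict Int Int) (k : Int) :
    List Nat → Nat → Int → Int → Int
  | [], _, _, nswr => nswr
  | l :: rest, r, dup, nswr =>
    let p := aAdv uniq cnt (uniq.getD l 0 * k) r dup
    let rangeLen : Int := (p.1 : Int) - (l : Int)
    let c := cnt.getD (uniq.getD l 0) 0
    let nswr1 := nswr + (if 2 ≤ c then (rangeLen - 1) * 3 else 0)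
    let nswr2 := nswr1 + (if 3 ≤ c then 1 else 0)
    let nswr3 := nswr2 + (rangeLen - 1) * (rangeLen - 2) * 3
    let dup2 := if 2 ≤ c then p.2 - 1 else p.2
    aLoop uniq cnt k rest p.1 dup2 (nswr3 + dup2 * 3)

def hyper_checkers (n : Int) (k : Int) (x : List Int) : Int :=
  let cnt := aCount x
  let uniq := PySem.List.sorted cnt.keys (fun v => v)
  aLoop uniq cnt k (List.range uniq.length) 0 0 0

-- ===== PORT B =====
-- `cnt[v] = cnt.get(v, 0) + 1`
def bCount (x : List Int) : PySem.Dict Int Int :=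
  x.foldl (fun d v => d.insert v (d.getD v 0 + 1)) PySem.Dict.empty

-- hand-written `_bisect_right`; `(lo+hi)//2` on nonnegative ints is exactly Nat division
def bBisect (a : List Int) (t : Int) (lo hi : Nat) : Nat :=
  if h : lo < hi then
    if a.getD ((lo + hi) / 2) 0 ≤ t then bBisect a t ((lo + hi) / 2 + 1) hi
    else bBisect a t lo ((lo + hi) / 2)
  else lo
termination_by hi - lo
decreasing_by all_goals omega

-- the `dpre` prefix-sum list, built front to back (acc = current last element)
def bPrefix (cnt : PySem.Dict Int Int) (uniq : List Int) (acc : Int) : List Int :=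
  match uniq with
  | [] => [acc]
  | v :: rest => acc :: bPrefix cnt rest (acc + (if 2 ≤ cnt.getD v 0 then 1 else 0))

def hyper_checkers_alt (n : Int) (k : Int) (x : List Int) : Int :=
  let cnt := bCount x
  let uniq := PySem.List.sorted cnt.keys (fun v => v)
  let dpre := bPrefix cnt uniq 0
  (PySem.List.enumerate uniq).foldl (fun total p =>
    let l := p.1
    let v := p.2
    let r : Int := (bBisect uniq (v * k) 0 uniq.length : Int)
    let m := r - l
    let c := cnt.getD v 0
    total + ((if 2 ≤ c then (m - 1) * 3 else 0)
      + (if 3 ≤ c then 1 else 0)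
      + (m - 1) * (m - 2) * 3
      + (PySem.List.pyGetD dpre r 0 - PySem.List.pyGetD dpre (l + 1) 0) * 3)) 0

-- ===== PRECONDITION & SPEC =====
-- Pre_ excludes negative k: there the "k-factor window" v ↦ v*k reverses the sorted order, so no
-- window is specified, and A's never-reset pointer and B's per-index bisect are each defensible.
def Pre_hyper_checkers (n : Int) (k : Int) (x : List Int) : Prop := 0 ≤ k
instance (n : Int) (k : Int) (x : List Int) : Decidable (Pre_hyper_checkers n k x) := by
  unfold Pre_hyper_checkers; infer_instance

def pvWitness_hyper_checkers : Int × Int × List Int := (0, 2, [1, 1, 2, 4])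

def Spec_hyper_checkers (n : Int) (k : Int) (x : List Int) (out : Int) : Prop :=
  out = hyper_checkers_alt n k x
instance (n : Int) (k : Int) (x : List Int) (out : Int) : Decidable (Spec_hyper_checkers n k x out) := by
  unfold Spec_hyper_checkers; infer_instance

-- ===== CLAIM (what is proved, stated in full; the proofs are below) =====
def Claim_equal_hyper_checkers : Prop := ∀ (n : Int) (k : Int) (x : List Int),
  Dom_hyper_checkers n k x → Pre_hyper_checkers n k x →
  Spec_hyper_checkers n k x (hyper_checkers n k x)

-- ===== LEMMAS AND PROOFS =====

-- characterisation of bisect_right's result on a sorted list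
def IsBR (u : List Int) (t : Int) (p : Nat) : Prop :=
  p ≤ u.length ∧ (∀ j, j < u.length → j < p → u.getD j 0 ≤ t) ∧
    (∀ j, j < u.length → p ≤ j → t < u.getD j 0)

-- number of the first i unique values whose count is ≥ 2
def dcount (cnt : PySem.Dict Int Int) (u : List Int) (i : Nat) : Int :=
  ((u.take i).countP (fun v => decide (2 ≤ cnt.getD v 0)) : Int)

-- B's per-index contribution, as a function of the Nat index
def termF (u : List Int) (cnt : PySem.Dict Int Int) (k : Int) (j : Nat) : Int :=
  let r := bBisect u (u.getD j 0 * k) 0 u.length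
  let m : Int := (r : Int) - (j : Int)
  let c := cnt.getD (u.getD j 0) 0
  (if 2 ≤ c then (m - 1) * 3 else 0) + (if 3 ≤ c then 1 else 0)
    + (m - 1) * (m - 2) * 3 + (dcount cnt u r - dcount cnt u (j + 1)) * 3

lemma count_eq (x : List Int) : aCount x = bCount x := by
  unfold aCount bCount
  have hstep : (fun (d : PySem.Dict Int Int) (i : Int) =>
      let d' := if d.contains i = false then d.insert i 0 else d
      d'.insert i (d'.getD i 0 + 1))
      = (fun (d : PySem.Dict Int Int) (v : Int) => d.insert v (d.getD v 0 + 1)) := by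
    funext d i
    by_cases h : d.contains i
    · simp [h]
    · simp only [Bool.not_eq_true] at h
      rw [PySem.Dict.getD_of_not_contains (h := h)]
      simp [h, PySem.Dict.getD_insert_self, PySem.Dict.insert_insert_self]
  rw [hstep]

lemma bBisect_isBR (u : List Int) (t : Int)
    (hmono : ∀ i j, i < j → j < u.length → u.getD i 0 ≤ u.getD j 0) :
    ∀ (d lo hi : Nat), hi - lo ≤ d → lo ≤ hi → hi ≤ u.length →
    (∀ j, j < u.length → j < lo → u.getD j 0 ≤ t) →
    (∀ j, j < u.length → hi ≤ j → t < u.getD j 0) →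
    IsBR u t (bBisect u t lo hi) := by
  intro d
  induction d with
  | zero =>
    intro lo hi hd hlh hhl hlo hhi
    have hnl : ¬ lo < hi := by omega
    rw [bBisect, dif_neg hnl]
    exact ⟨by omega, hlo, fun j hj hje => hhi j hj (by omega)⟩
  | succ d ih =>
    intro lo hi hd hlh hhl hlo hhi
    by_cases hcond : lo < hi
    · rw [bBisect, dif_pos hcond]
      have hmid : lo ≤ (lo + hi) / 2 ∧ (lo + hi) / 2 < hi := by omega
      by_cases hm : u.getD ((lo + hi) / 2) 0 ≤ t
      · rw [if_pos hm]
        refine ih ((lo + hi) / 2 + 1) hi (by omega) (by omega) hhl ?_ hhi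
        intro j hj hjm
        rcases Nat.lt_or_ge j ((lo + hi) / 2) with hlt | hge
        · exact le_trans (hmono j ((lo + hi) / 2) hlt (by omega)) hm
        · have hje : j = (lo + hi) / 2 := by omega
          rw [hje]; exact hm
      · rw [if_neg hm]
        refine ih lo ((lo + hi) / 2) (by omega) (by omega) (by omega) hlo ?_
        intro j hj hjm
        rcases Nat.lt_or_ge ((lo + hi) / 2) j with hlt | hge
        · exact lt_of_lt_of_le (by omega) (hmono ((lo + hi) / 2) j hlt hj)
        · have hje : j = (lo + hi) / 2 := by omega
          rw [hje]; omega
    · rw [bBisect, dif_neg hcond]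
      exact ⟨by omega, hlo, fun j hj hje => hhi j hj (by omega)⟩

lemma isBR_le (u : List Int) (t t' : Int) (p q : Nat) (ht : t ≤ t')
    (hp : IsBR u t p) (hq : IsBR u t' q) : p ≤ q := by
  by_contra hlt
  push_neg at hlt
  have hq1 : q < u.length := lt_of_lt_of_le hlt hp.1
  have h1 : u.getD q 0 ≤ t := hp.2.1 q hq1 hlt
  have h2 : t' < u.getD q 0 := hq.2.2 q hq1 le_rfl
  omega

lemma dcount_succ (cnt : PySem.Dict Int Int) (u : List Int) (i : Nat) (h : i < u.length) :
    dcount cnt u (i + 1) = dcount cnt u i + (if 2 ≤ cnt.getD (u.getD i 0) 0 then 1 else 0) := by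
  unfold dcount
  rw [List.take_succ, List.countP_append]
  rw [List.getElem?_eq_getElem h, List.getD_eq_getElem _ _ h]
  simp only [Option.toList_some, List.countP_cons, List.countP_nil]
  by_cases hc : 2 ≤ cnt.getD u[i] 0 <;> simp [hc]

lemma aAdv_eq (u : List Int) (cnt : PySem.Dict Int Int) (t : Int) :
    ∀ (d r : Nat) (dup : Int) (p : Nat), u.length - r ≤ d → IsBR u t p → r ≤ p →
    aAdv u cnt t r dup = (p, dup + (dcount cnt u p - dcount cnt u r)) := by
  intro d
  induction d with
  | zero =>
    intro r dup p hd hp hrp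
    have hpl : p ≤ u.length := hp.1
    have hre : r = p := by omega
    have hnc : ¬ (r < u.length ∧ u.getD r 0 ≤ t) := fun hc => by omega
    rw [aAdv, dif_neg hnc, hre]
    simp
  | succ d ih =>
    intro r dup p hd hp hrp
    have hpl : p ≤ u.length := hp.1
    by_cases h : r < u.length ∧ u.getD r 0 ≤ t
    · rw [aAdv, dif_pos h]
      have hrlt : r < p := by
        by_contra hle
        have hpr : p ≤ r := by omega
        exact absurd h.2 (not_le.mpr (hp.2.2 r h.1 hpr))
      rw [ih (r + 1) _ p (by omega) hp (by omega)]
      rw [dcount_succ cnt u r h.1]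
      by_cases hc : 2 ≤ cnt.getD (u.getD r 0) 0
      · rw [if_pos hc, if_pos hc]
        simp only [Prod.mk.injEq, true_and]
        ring
      · rw [if_neg hc, if_neg hc]
        simp only [Prod.mk.injEq, true_and]
        ring
    · have hre : r = p := by
        by_contra hne
        have hrl : r < p := by omega
        have hlen : r < u.length := by omega
        exact h ⟨hlen, hp.2.1 r hlen hrl⟩
      rw [aAdv, dif_neg h, hre]
      simp

lemma loop_eq (u : List Int) (cnt : PySem.Dict Int Int) (k : Int) (hk : 0 ≤ k)
    (hmono : ∀ i j, i < j → j < u.length → u.getD i 0 ≤ u.getD j 0) :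
    ∀ (d l : Nat) (r : Nat) (dup nswr : Int), u.length - l ≤ d → l ≤ u.length →
    (l < u.length → r ≤ bBisect u (u.getD l 0 * k) 0 u.length) → r ≤ u.length →
    dup = dcount cnt u r - dcount cnt u l →
    aLoop u cnt k (List.range' l (u.length - l)) r dup nswr
      = nswr + ((List.range' l (u.length - l)).map (termF u cnt k)).sum := by
  intro d
  induction d with
  | zero =>
    intro l r dup nswr hd hl hrl hr hdup
    have hle : u.length - l = 0 := by omega
    rw [hle]
    simp [aLoop]
  | succ d ih =>
    intro l r dup nswr hd hl hrl hr hdup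
    by_cases hlt : l < u.length
    · have hsplit : u.length - l = (u.length - (l + 1)) + 1 := by omega
      rw [hsplit, List.range'_succ]
      have hIs : ∀ j, j < u.length →
          IsBR u (u.getD j 0 * k) (bBisect u (u.getD j 0 * k) 0 u.length) := by
        intro j hj
        exact bBisect_isBR u _ hmono u.length 0 u.length (by omega) (by omega) le_rfl
          (fun j' hj' h0 => absurd h0 (Nat.not_lt_zero j'))
          (fun j' hj' hje => absurd hj' (by omega))
      have hbrIs := hIs l hlt
      simp only [aLoop, List.map_cons, List.sum_cons]
      rw [aAdv_eq u cnt (u.getD l 0 * k) u.length r dup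
            (bBisect u (u.getD l 0 * k) 0 u.length) (by omega) hbrIs (hrl hlt)]
      have hdup2 : (if 2 ≤ cnt.getD (u.getD l 0) 0 then
            dup + (dcount cnt u (bBisect u (u.getD l 0 * k) 0 u.length) - dcount cnt u r) - 1
          else dup + (dcount cnt u (bBisect u (u.getD l 0 * k) 0 u.length) - dcount cnt u r))
          = dcount cnt u (bBisect u (u.getD l 0 * k) 0 u.length) - dcount cnt u (l + 1) := by
        rw [dcount_succ cnt u l hlt]
        by_cases hc : 2 ≤ cnt.getD (u.getD l 0) 0
        · rw [if_pos hc, if_pos hc, hdup]; ring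
        · rw [if_neg hc, if_neg hc, hdup]; ring
      rw [hdup2]
      rw [ih (l + 1) (bBisect u (u.getD l 0 * k) 0 u.length) _ _ (by omega) (by omega)
            (fun h1 => isBR_le u _ _ _ _
              (mul_le_mul_of_nonneg_right (hmono l (l + 1) (by omega) h1) hk)
              hbrIs (hIs (l + 1) h1))
            hbrIs.1 rfl]
      simp only [termF]
      rw [dcount_succ cnt u l hlt]
      by_cases hc2 : 2 ≤ cnt.getD (u.getD l 0) 0 <;>
        by_cases hc3 : 3 ≤ cnt.getD (u.getD l 0) 0 <;>
        simp only [hc2, hc3, if_true, if_false, if_pos, if_neg, not_false_iff] <;>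
        ring
    · have hle : u.length - l = 0 := by omega
      rw [hle]
      simp [aLoop]

lemma bPrefix_getD (cnt : PySem.Dict Int Int) :
    ∀ (u : List Int) (acc : Int) (i : Nat), i ≤ u.length →
    (bPrefix cnt u acc).getD i 0
      = acc + ((u.take i).countP (fun v => decide (2 ≤ cnt.getD v 0)) : Int) := by
  intro u
  induction u with
  | nil =>
    intro acc i hi
    have : i = 0 := by simpa using hi
    simp [bPrefix, this]
  | cons v rest ih =>
    intro acc i hi
    cases i with
    | zero => simp [bPrefix]
    | succ j =>
      have hj : j ≤ rest.length := by simpa using hi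
      simp only [bPrefix, List.getD_cons_succ, List.take_succ_cons, List.countP_cons]
      rw [ih _ j hj]
      by_cases hc : 2 ≤ cnt.getD v 0 <;> simp [hc] <;> push_cast <;> ring

lemma alt_eq (n k : Int) (x : List Int)
    (hmono : ∀ i j, i < j →
      j < (PySem.List.sorted (bCount x).keys (fun v => v)).length →
      (PySem.List.sorted (bCount x).keys (fun v => v)).getD i 0
        ≤ (PySem.List.sorted (bCount x).keys (fun v => v)).getD j 0) :
    hyper_checkers_alt n k x
      = ((List.range' 0 (PySem.List.sorted (bCount x).keys (fun v => v)).length).map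
          (termF (PySem.List.sorted (bCount x).keys (fun v => v)) (bCount x) k)).sum := by
  unfold hyper_checkers_alt
  rw [PySem.List.foldl_add, zero_add]
  congr 1
  apply List.ext_getElem
  · simp
  · intro i h1 h2
    simp only [List.getElem_map, PySem.List.getElem_enumerate, List.getElem_range']
    set u := PySem.List.sorted (bCount x).keys (fun v => v) with hu
    set cnt := bCount x with hcnt
    have hiu : i < u.length := by simpa using h1
    have hbisle : bBisect u (u[i] * k) 0 u.length ≤ u.length :=
      (bBisect_isBR u (u[i] * k) hmono u.length 0 u.length (by omega) (by omega) le_rfl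
        (fun j' hj' h0 => absurd h0 (Nat.not_lt_zero j'))
        (fun j' hj' hje => absurd hj' (by omega))).1
    simp only [termF, zero_add, one_mul]
    rw [List.getD_eq_getElem u 0 hiu]
    have hc1 : ((i : Int) + 1) = ((i + 1 : Nat) : Int) := by push_cast; ring
    rw [hc1, PySem.List.pyGetD_natCast, PySem.List.pyGetD_natCast]
    rw [bPrefix_getD cnt u 0 _ hbisle, bPrefix_getD cnt u 0 (i + 1) (by omega)]
    simp only [dcount, zero_add]
    push_cast
    ring

lemma sorted_keys_mono (x : List Int) :
    ∀ i j, i < j → j < (PySem.List.sorted (bCount x).keys (fun v => v)).length →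
    (PySem.List.sorted (bCount x).keys (fun v => v)).getD i 0
      ≤ (PySem.List.sorted (bCount x).keys (fun v => v)).getD j 0 := by
  intro i j hij hj
  have hb : bCount x = PySem.Dict.counter x := PySem.Dict.foldl_insert_getD_add_one_eq_counter x
  have hpw : (PySem.List.sorted (bCount x).keys (fun v => v)).Pairwise (· < ·) := by
    rw [hb, PySem.Dict.keys_counter]
    exact PySem.List.sorted_ofList_pairwise_lt x
  rw [List.getD_eq_getElem _ _ (lt_trans hij hj), List.getD_eq_getElem _ _ hj]
  exact le_of_lt (List.pairwise_iff_getElem.mp hpw i j _ _ hij)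

-- ===== VERDICT (by name: the statement is the Claim_ definition above) =====
theorem hyper_checkers_spec : Claim_equal_hyper_checkers := by
  intro n k x _ hk
  have hmono := sorted_keys_mono x
  unfold Spec_hyper_checkers
  rw [alt_eq n k x hmono]
  have hA : hyper_checkers n k x
      = aLoop (PySem.List.sorted (bCount x).keys (fun v => v)) (bCount x) k
          (List.range (PySem.List.sorted (bCount x).keys (fun v => v)).length) 0 0 0 := by
    unfold hyper_checkers
    rw [count_eq]
  rw [hA, List.range_eq_range']
  have := loop_eq (PySem.List.sorted (bCount x).keys (fun v => v)) (bCount x) k hk hmono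
    (PySem.List.sorted (bCount x).keys (fun v => v)).length 0 0 0 0 (by omega) (by omega)
    (fun _ => Nat.zero_le _) (by omega) (by simp [dcount])
  simpa using this
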